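-- pv_equiv track=rewrite | github.com/zc402/MTPGR | mtpgr/kinematic/heights.py | _no_duplicated_names
-- ===== SOURCE A (Python) =====
-- def _no_duplicated_names(heights_name):
--     # Ensure no duplicated height names
--     used_names = []
--     for line in heights_name:
--         for name in line:
--             if name in used_names:
--                 return False
--             else:
--                 used_names.append(name)
--     return True
-- ===== SOURCE B (Python) =====
-- def _no_duplicated_names(heights_name):
--     all_names = [name for line in heights_name for name in line]
--     return len(all_names) == len(set(all_names))
-- ===== Notes on version B (the rewrite author's own statement) =====
-- stated objective: idiomatic
-- what changed: Replaces the incremental membership-test-and-append loop with early return by flattening all names once and comparing the flat list's length with its set's size.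
import Mathlib
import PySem

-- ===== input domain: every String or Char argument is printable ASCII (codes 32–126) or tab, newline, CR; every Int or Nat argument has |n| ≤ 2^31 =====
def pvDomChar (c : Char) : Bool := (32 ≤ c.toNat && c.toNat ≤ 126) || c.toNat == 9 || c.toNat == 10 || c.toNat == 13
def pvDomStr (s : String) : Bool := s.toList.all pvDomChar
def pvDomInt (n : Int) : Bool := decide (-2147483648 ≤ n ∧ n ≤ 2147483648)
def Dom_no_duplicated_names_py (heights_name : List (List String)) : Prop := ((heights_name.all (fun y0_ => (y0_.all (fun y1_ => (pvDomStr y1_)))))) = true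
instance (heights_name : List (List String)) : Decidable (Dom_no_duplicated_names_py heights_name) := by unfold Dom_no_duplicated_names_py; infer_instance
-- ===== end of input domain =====

-- B flattens all names once and compares the flat list's length with its set's size (idiomatic);
-- A scans with an incremental used-names list, membership test and early return.

-- ===== PORT A =====
-- inner 'for name in line' loop: none = early 'return False', some = the updated used_names
def pvInnerA (used : List String) : List String → Option (List String)
  | [] => some used
  | name :: rest =>
      if used.contains name then none
      else pvInnerA (used ++ [name]) rest

-- outer 'for line in heights_name' loop
def pvOuterA (used : List String) : List (List String) → Bool
  | [] => true
  | line :: rest =>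
      match pvInnerA used line with
      | none => false
      | some used' => pvOuterA used' rest

def no_duplicated_names_py (heights_name : List (List String)) : Bool :=
  pvOuterA [] heights_name

-- ===== PORT B =====
def no_duplicated_names_py_alt (heights_name : List (List String)) : Bool :=
  let all_names := heights_name.flatMap (fun line => line)
  all_names.length == (PySem.Set.ofList all_names).length

-- ===== PRECONDITION & SPEC =====
def Spec_no_duplicated_names_py (heights_name : List (List String)) (out : Bool) : Prop := out = no_duplicated_names_py_alt heights_name
instance (heights_name : List (List String)) (out : Bool) : Decidable (Spec_no_duplicated_names_py heights_name out) := by unfold Spec_no_duplicated_names_py; infer_instance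

-- ===== CLAIM (what is proved, stated in full; the proofs are below) =====
def Claim_equal_no_duplicated_names_py : Prop := ∀ (heights_name : List (List String)), Dom_no_duplicated_names_py heights_name → Spec_no_duplicated_names_py heights_name (no_duplicated_names_py heights_name)

-- ===== LEMMAS AND PROOFS =====

-- A's inner loop succeeds exactly when appending the line keeps used duplicate-free
theorem pvInnerA_eq (line : List String) : ∀ (used : List String), used.Nodup →
    pvInnerA used line = if (used ++ line).Nodup then some (used ++ line) else none := by
  induction line with
  | nil => intro used h; simp [pvInnerA, h]
  | cons name rest ih =>
    intro used h
    by_cases hm : name ∈ used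
    · have : ¬ (used ++ name :: rest).Nodup := by
        intro hn
        exact (List.disjoint_of_nodup_append hn) hm List.mem_cons_self
      simp [pvInnerA, hm, this]
    · have h1 : (used ++ [name]).Nodup := by
        simp [List.nodup_append, h]
        exact fun a ha e => hm (e ▸ ha)
      have := ih (used ++ [name]) h1
      simp only [pvInnerA, List.contains_iff_mem, hm]
      simpa [List.append_assoc] using this

-- A's outer loop decides Nodup of used ++ flattened remainder
theorem pvOuterA_eq (lines : List (List String)) : ∀ (used : List String), used.Nodup →
    pvOuterA used lines = decide ((used ++ lines.flatMap (fun l => l)).Nodup) := by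
  induction lines with
  | nil => intro used h; simp [pvOuterA, h]
  | cons line rest ih =>
    intro used h
    rw [pvOuterA, pvInnerA_eq line used h]
    by_cases hn : (used ++ line).Nodup
    · rw [if_pos hn]
      have := ih (used ++ line) hn
      simpa [List.append_assoc] using this
    · rw [if_neg hn]
      have hsub : (used ++ line).Sublist (used ++ (line :: rest).flatMap (fun l => l)) := by
        simp only [List.flatMap_cons, ← List.append_assoc]
        exact List.sublist_append_left _ _
      have hthis : ¬ (used ++ (line :: rest).flatMap (fun l => l)).Nodup := fun hnd =>
        hn (List.Nodup.sublist hsub hnd)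
      exact (decide_eq_false hthis).symm

-- set(xs) has the same size as xs exactly when xs has no duplicates
theorem ofList_length_eq_iff (xs : List String) :
    ((PySem.Set.ofList xs).length = xs.length ↔ xs.Nodup) := by
  induction xs using List.reverseRecOn with
  | nil => simp [PySem.Set.ofList_nil]
  | append_singleton ys y ih =>
    rw [PySem.Set.ofList_append_singleton, PySem.Set.add_eq_ite]
    by_cases hm : y ∈ ys
    · have hmem : y ∈ PySem.Set.ofList ys := by
        rw [PySem.Set.mem_ofList]; exact hm
      have hle := PySem.Set.length_ofList_le (xs := ys)
      rw [if_pos hmem]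
      constructor
      · intro hlen
        exfalso
        simp only [List.length_append, List.length_cons, List.length_nil] at hlen
        omega
      · intro hnd
        exact absurd List.mem_cons_self (List.disjoint_of_nodup_append hnd hm)
    · have hmem : y ∉ PySem.Set.ofList ys := by
        rw [PySem.Set.mem_ofList]; exact hm
      rw [if_neg hmem]
      simp only [List.length_append, List.length_cons, List.length_nil]
      constructor
      · intro hlen
        have : (PySem.Set.ofList ys).length = ys.length := by omega
        have hnd := ih.mp this
        simp [List.nodup_append, hnd]
        exact fun a ha e => hm (e ▸ ha)
      · intro hnd
        have hnd' : ys.Nodup := (List.nodup_append.mp hnd).1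
        have := ih.mpr hnd'
        omega

-- ===== VERDICT (by name: the statement is the Claim_ definition above) =====
theorem no_duplicated_names_py_spec : Claim_equal_no_duplicated_names_py := by
  intro heights_name _
  unfold Spec_no_duplicated_names_py
  rw [no_duplicated_names_py, pvOuterA_eq _ [] List.nodup_nil]
  rw [no_duplicated_names_py_alt]
  simp only [List.nil_append]
  have h := ofList_length_eq_iff (heights_name.flatMap (fun l => l))
  rw [Bool.eq_iff_iff]
  simp only [decide_eq_true_eq, beq_iff_eq]
  exact ⟨fun hnd => (h.mpr hnd).symm, fun he => h.mp he.symm⟩
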